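-- pv_equiv track=rewrite | github.com/Xilinx/xup_vitis_network_example | Notebooks/vnx_utils.py | _byteOrderingEndianess
-- ===== SOURCE A (Python) =====
-- def _byteOrderingEndianess(num, length=4):
--     """
--     Convert from little endian to big endian and vice versa
--
--     Parameters
--     ----------
--     num: int
--       input number
--
--     length:
--       number of bytes of the input number
--
--     Returns
--     -------
--     An integer with the endianness changed with respect to input number
--
--     """
--     if not isinstance(num, int):
--         raise ValueError("num must be an integer")
--
--     if not isinstance(length, int):
--         raise ValueError("length must be an positive integer")
--     elif length < 0:
--         raise ValueError("length cannot be negative")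
--
--     aux = 0
--     for i in range(length):
--         byte_index = num >> ((length - 1 - i) * 8) & 0xFF
--         aux += byte_index << (i * 8)
--     return aux
-- ===== SOURCE B (Python) =====
-- def _byteOrderingEndianess(num, length=4):
--     if not isinstance(num, int):
--         raise ValueError("num must be an integer")
--
--     if not isinstance(length, int):
--         raise ValueError("length must be an positive integer")
--     elif length < 0:
--         raise ValueError("length cannot be negative")
--
--     m = num & ((1 << (length * 8)) - 1)
--     return int.from_bytes(m.to_bytes(length, 'big'), 'little')
-- ===== Notes on version B (the rewrite author's own statement) =====
-- stated objective: idiomatic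
-- what changed: Replaces the per-byte shift/mask/accumulate loop with a mask to length bytes followed by int.to_bytes(length, 'big') reinterpreted via int.from_bytes(..., 'little'), serializing once instead of looping over byte positions.
import Mathlib
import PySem

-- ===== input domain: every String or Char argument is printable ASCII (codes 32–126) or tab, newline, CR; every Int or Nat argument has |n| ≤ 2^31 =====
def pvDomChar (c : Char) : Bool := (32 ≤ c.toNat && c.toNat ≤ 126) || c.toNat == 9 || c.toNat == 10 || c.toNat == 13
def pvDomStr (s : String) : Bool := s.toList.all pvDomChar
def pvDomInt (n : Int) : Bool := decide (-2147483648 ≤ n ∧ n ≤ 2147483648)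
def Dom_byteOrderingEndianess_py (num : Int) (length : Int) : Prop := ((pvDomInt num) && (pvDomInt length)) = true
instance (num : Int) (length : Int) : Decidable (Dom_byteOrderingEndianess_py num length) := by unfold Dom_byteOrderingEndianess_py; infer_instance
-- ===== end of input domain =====

-- B replaces A's per-byte shift/accumulate loop by mask + big-endian serialize + little-endian reinterpret (different decomposition; not claimed faster).

-- ===== PORT A =====
-- Python's `>>`/`<<` on int with a nonnegative shift are Lean's `>>>`/`<<<` with a Nat
-- shift; the shift amounts in the loop are nonnegative for i ∈ range(length), so `.toNat` is exact there.
def byteOrderingEndianess_py (num : Int) (length : Int) : Int :=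
  (PySem.List.pyRange 0 length 1).foldl
    (fun aux i => aux + (PySem.Int.band (num >>> (((length - 1 - i) * 8).toNat)) 255) <<< ((i * 8).toNat)) 0

-- ===== PORT B =====
-- m.to_bytes(n, 'big') for 0 ≤ m < 2^(8n): last byte is m % 256, preceded by the bytes of m / 256.
def toBytesBE (m : Int) : Nat → List Int
  | 0 => []
  | n + 1 => toBytesBE (m / 256) n ++ [m % 256]

-- int.from_bytes(bs, 'little') = bs[0] + 256 * int.from_bytes(bs[1:], 'little')
def fromBytesLE : List Int → Int
  | [] => 0
  | b :: rest => b + 256 * fromBytesLE rest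

def byteOrderingEndianess_py_alt (num : Int) (length : Int) : Int :=
  let m := PySem.Int.band num (((1:Int) <<< ((length * 8).toNat)) - 1)
  fromBytesLE (toBytesBE m length.toNat)

-- ===== PRECONDITION & SPEC =====
-- A raises ValueError exactly when length < 0 (its non-int checks are outside the typed signature); Pre_ admits everything else.
def Pre_byteOrderingEndianess_py (num : Int) (length : Int) : Prop := 0 ≤ length
instance (num : Int) (length : Int) : Decidable (Pre_byteOrderingEndianess_py num length) := by unfold Pre_byteOrderingEndianess_py; infer_instance
def pvWitness_byteOrderingEndianess_py : Int × Int := (305419896, 4)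

def Spec_byteOrderingEndianess_py (num : Int) (length : Int) (out : Int) : Prop := out = byteOrderingEndianess_py_alt num length
instance (num : Int) (length : Int) (out : Int) : Decidable (Spec_byteOrderingEndianess_py num length out) := by unfold Spec_byteOrderingEndianess_py; infer_instance

-- ===== CLAIM (what is proved, stated in full; the proofs are below) =====
def Claim_equal_byteOrderingEndianess_py : Prop := ∀ (num : Int) (length : Int), Dom_byteOrderingEndianess_py num length → Pre_byteOrderingEndianess_py num length → Spec_byteOrderingEndianess_py num length (byteOrderingEndianess_py num length)

-- ===== LEMMAS AND PROOFS =====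

-- The common byte-reversal value both programs compute.
def revN (num : Int) : Nat → Int
  | 0 => 0
  | L + 1 => revN (num / 256) L + (num % 256) * 256 ^ L

-- Python's `a & ((1 << k) - 1)` (and `a & 0xFF` with k = 8) is reduction mod 2^k, also for negative a.
theorem band_mask (a : Int) (k : Nat) : PySem.Int.band a (2 ^ k - 1) = a % 2 ^ k := by
  have hp : (0:Int) < 2 ^ k := by positivity
  have hb : (0:Int) ≤ 2 ^ k - 1 := by omega
  have htn : ((2:Int) ^ k - 1).toNat = 2 ^ k - 1 := by
    have h2 : ((2:Int) ^ k) = ((2 ^ k : Nat) : Int) := by push_cast; ring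
    omega
  unfold PySem.Int.band
  by_cases ha : 0 ≤ a
  · simp only [ha, hb, if_true]
    rw [htn, Nat.and_two_pow_sub_one_eq_mod]
    have h2 : a = ((a.toNat : Nat) : Int) := by omega
    rw [h2]
    simp
  · simp only [ha, hb, if_true, if_false]
    rw [htn, Nat.land_comm, Nat.and_two_pow_sub_one_eq_mod]
    set s := (-a - 1).toNat with hsdef
    have hsa : a = -(s:Int) - 1 := by omega
    have hlt : s % 2 ^ k < 2 ^ k := Nat.mod_lt _ (by positivity)
    have hdm : (2:Int) ^ k * ((s / 2 ^ k : Nat) : Int) + ((s % 2 ^ k : Nat) : Int) = (s : Int) := by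
      exact_mod_cast Nat.div_add_mod s (2 ^ k)
    have hrew : a = 2 ^ k * (-(((s / 2 ^ k : Nat) : Int)) - 1) + ((2:Int) ^ k - 1 - ((s % 2 ^ k : Nat) : Int)) := by
      rw [hsa, ← hdm]; ring
    have hgoal : a % 2 ^ k = (2:Int) ^ k - 1 - ((s % 2 ^ k : Nat) : Int) := by
      rw [hrew, Int.add_comm, Int.add_mul_emod_self_left]
      apply Int.emod_eq_of_lt
      · have : (0:Int) ≤ ((s % 2 ^ k : Nat) : Int) := by positivity
        have h2 : ((s % 2 ^ k : Nat) : Int) < 2 ^ k := by exact_mod_cast hlt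
        omega
      · omega
    rw [hgoal]
    omega

theorem length_toBytesBE (m : Int) (L : Nat) : (toBytesBE m L).length = L := by
  induction L generalizing m with
  | zero => rfl
  | succ L ih => simp [toBytesBE, ih]

theorem fromBytesLE_append_singleton (xs : List Int) (y : Int) :
    fromBytesLE (xs ++ [y]) = fromBytesLE xs + y * 256 ^ xs.length := by
  induction xs with
  | nil => simp [fromBytesLE]
  | cons b rest ih => simp [fromBytesLE, ih]; ring

theorem emod_mul_ediv (a b c : Int) (hb : 0 < b) : (a % (b * c)) / b = (a / b) % c := by
  have h1 : a % (b*c) = a + b*(-(c*(a/(b*c)))) := by rw [Int.emod_def]; ring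
  rw [h1, Int.add_mul_ediv_left _ _ (by omega : b ≠ 0), Int.emod_def,
    Int.ediv_ediv_of_nonneg hb.le]
  ring

theorem b_core (num : Int) (L : Nat) :
    fromBytesLE (toBytesBE (num % 2 ^ (8 * L)) L) = revN num L := by
  induction L generalizing num with
  | zero => rfl
  | succ L ih =>
    have hpow : (2:Int) ^ (8 * (L+1)) = 256 * 2 ^ (8 * L) := by
      rw [show 8 * (L+1) = 8 + 8*L by ring, pow_add]; norm_num
    show fromBytesLE (toBytesBE (num % 2 ^ (8*(L+1)) / 256) L ++ [num % 2 ^ (8*(L+1)) % 256]) = _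
    rw [fromBytesLE_append_singleton, length_toBytesBE]
    rw [hpow, emod_mul_ediv _ _ _ (by norm_num), Int.emod_emod_of_dvd _ ⟨2 ^ (8*L), rfl⟩]
    rw [ih]
    rfl

theorem shift_eq (num : Int) (n : Nat) : num >>> n = num / 2 ^ n := by
  rw [Int.shiftRight_eq_div_pow]; norm_cast

theorem a_core (num : Int) (L : Nat) : byteOrderingEndianess_py num (L : Int) = revN num L := by
  induction L generalizing num with
  | zero =>
    simp [byteOrderingEndianess_py, revN]
  | succ L ih =>
    unfold byteOrderingEndianess_py
    rw [PySem.List.pyRange_one]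
    have h1 : ((((L+1 : Nat)) : Int) - 0).toNat = L + 1 := by omega
    rw [h1, List.range_succ, List.map_append, List.foldl_append]
    have ihx := ih (num / 256)
    unfold byteOrderingEndianess_py at ihx
    rw [PySem.List.pyRange_one] at ihx
    have h2 : (((L : Nat) : Int) - 0).toNat = L := by omega
    rw [h2] at ihx
    have hcongr : List.foldl
        (fun aux i => aux + (PySem.Int.band (num >>> ((((L+1 : Nat) : Int) - 1 - i) * 8).toNat) 255) <<< ((i * 8).toNat)) 0
        ((List.range L).map (fun (k : Nat) => (0:Int) + (k : Int)))
      = List.foldl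
        (fun aux i => aux + (PySem.Int.band ((num / 256) >>> ((((L : Nat) : Int) - 1 - i) * 8).toNat) 255) <<< ((i * 8).toNat)) 0
        ((List.range L).map (fun (k : Nat) => (0:Int) + (k : Int))) := by
      apply PySem.List.foldl_congr_mem
      intro acc x hx
      obtain ⟨k, hk, rfl⟩ := List.mem_map.mp hx
      have hkL : k < L := List.mem_range.mp hk
      have hs1 : (((((L+1 : Nat)) : Int) - 1 - ((0:Int) + (k:Int))) * 8).toNat = (L - k) * 8 := by omega
      have hs2 : ((((L : Nat) : Int) - 1 - ((0:Int) + (k:Int))) * 8).toNat = (L - 1 - k) * 8 := by omega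
      rw [hs1, hs2, shift_eq, shift_eq, Int.ediv_ediv_of_nonneg (by norm_num : (0:Int) ≤ 256),
        show (256:Int) * 2^((L-1-k)*8) = 2^((L-k)*8) by
          rw [show (256:Int) = 2^8 by norm_num, ← pow_add]; congr 1; omega]
    rw [hcongr, ihx]
    simp only [List.map_cons, List.map_nil, List.foldl_cons, List.foldl_nil]
    have hs0 : (((((L+1:Nat)) : Int) - 1 - ((0:Int) + (L:Int))) * 8).toNat = 0 := by omega
    have hsl : ((((0:Int) + (L:Int)) * 8)).toNat = 8 * L := by omega
    rw [hs0, hsl]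
    have hb : PySem.Int.band (num >>> (0:Nat)) 255 = num % 256 := by
      rw [show (255:Int) = 2^8 - 1 by norm_num, band_mask]
      norm_num
    rw [hb, Int.shiftLeft_eq]
    show revN (num / 256) L + num % 256 * 2 ^ (8*L) = revN num (L+1)
    rw [show ((2:Int))^(8*L) = 256^L by rw [show (256:Int) = 2^8 by norm_num, ← pow_mul]]
    rfl

-- ===== VERDICT (by name: the statement is the Claim_ definition above) =====
theorem byteOrderingEndianess_py_spec : Claim_equal_byteOrderingEndianess_py := by
  intro num length _ hpre
  have hL : length = ((length.toNat : Nat) : Int) := (Int.toNat_of_nonneg hpre).symm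
  unfold Spec_byteOrderingEndianess_py byteOrderingEndianess_py_alt
  rw [hL, a_core]
  have h1 : (1 : Int) <<< (((length.toNat : Int) * 8).toNat) - 1 = 2 ^ (8 * length.toNat) - 1 := by
    rw [Int.shiftLeft_eq, one_mul]
    congr 2
    omega
  rw [h1, band_mask]
  show revN num length.toNat
      = fromBytesLE (toBytesBE (num % 2 ^ (8 * length.toNat)) ((length.toNat : Int)).toNat)
  rw [Int.toNat_natCast]
  exact (b_core num length.toNat).symm
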